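-- pv_equiv track=rewrite | github.com/Facetomyself/reverse-expert-kb | ops-assistant/checks/send_daily_report.py | summarize_groups
-- ===== SOURCE A (Python) =====
-- from collections import defaultdict
--
-- PROFILE_LABELS = {
--     'core': '核心',
--     'standard': '标准',
--     'retired': '观察',
--     'exception': '例外',
-- }
--
-- def summarize_groups(hosts, overall_map):
--     grouped = defaultdict(list)
--     for host in hosts:
--         grouped[host.get('alert_profile', 'standard')].append(host)
--     lines = []
--     for profile in ('core', 'standard', 'retired', 'exception'):
--         items = grouped.get(profile) or []
--         if not items:
--             continue
--         ok_count = sum(1 for item in items if overall_map.get(item['name']) is not False)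
--         total = len(items)
--         lines.append(f"- {PROFILE_LABELS.get(profile, profile)}: {ok_count}/{total} 正常")
--     return lines
-- ===== SOURCE B (Python) =====
-- def summarize_groups(hosts, overall_map):
--     lines = []
--     for profile, label in (('core', '核心'), ('standard', '标准'),
--                            ('retired', '观察'), ('exception', '例外')):
--         ok = total = 0
--         for host in hosts:
--             if host.get('alert_profile', 'standard') == profile:
--                 total += 1
--                 ok += overall_map.get(host['name']) is not False
--         if total:
--             lines.append(f"- {label}: {ok}/{total} 正常")
--     return lines
-- ===== Notes on version B (the rewrite author's own statement) =====
-- stated objective: simpler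
-- what changed: B drops the defaultdict grouping of hosts into per-profile lists entirely: it scans hosts once per labelled profile keeping two integer counters (total, ok) and emits the line directly, instead of building lists and counting them afterwards.
import Mathlib
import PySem

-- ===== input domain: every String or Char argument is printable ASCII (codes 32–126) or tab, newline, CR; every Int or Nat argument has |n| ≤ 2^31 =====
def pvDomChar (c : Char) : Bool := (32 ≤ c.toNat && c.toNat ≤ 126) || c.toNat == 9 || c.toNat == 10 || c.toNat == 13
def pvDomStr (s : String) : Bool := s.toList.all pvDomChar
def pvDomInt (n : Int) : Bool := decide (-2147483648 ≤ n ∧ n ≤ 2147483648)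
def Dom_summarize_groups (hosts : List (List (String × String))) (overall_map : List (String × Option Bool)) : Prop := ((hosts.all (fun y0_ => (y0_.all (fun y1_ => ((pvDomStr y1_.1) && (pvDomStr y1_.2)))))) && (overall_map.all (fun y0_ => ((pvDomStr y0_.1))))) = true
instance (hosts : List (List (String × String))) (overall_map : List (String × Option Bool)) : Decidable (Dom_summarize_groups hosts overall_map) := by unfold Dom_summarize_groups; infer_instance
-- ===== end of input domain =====

-- B replaces A's defaultdict-of-lists grouping by one pair of integer counters per labelled
-- profile (simpler: no intermediate lists); return values agree on all inputs where A returns.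

-- ===== PORT A =====
-- host.get('alert_profile', 'standard')   (shared subexpression of both Pythons)
def pvProf (h : List (String × String)) : String :=
  PySem.Dict.getD (PySem.Dict.mk h) "alert_profile" "standard"

-- overall_map.get(host['name']) is not False   (shared subexpression of both Pythons).
-- host['name'] raises KeyError when absent; Pre_ excludes that, the total form defaults to "".
def pvOkHost (om : List (String × Option Bool)) (h : List (String × String)) : Bool :=
  !(PySem.Dict.get? (PySem.Dict.mk om) ((PySem.Dict.get? (PySem.Dict.mk h) "name").getD "") == some (some false))

def PROFILE_LABELS : PySem.Dict String String :=
  PySem.Dict.ofList [("core", "核心"), ("standard", "标准"), ("retired", "观察"), ("exception", "例外")]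

def summarize_groups (hosts : List (List (String × String))) (overall_map : List (String × Option Bool)) : List String :=
  let grouped : PySem.Dict String (List (List (String × String))) :=
    hosts.foldl (fun g h => g.insert (pvProf h) (g.getD (pvProf h) [] ++ [h])) PySem.Dict.empty
  (["core", "standard", "retired", "exception"] : List String).foldl (fun lines profile =>
    let items := (grouped.get? profile).getD []          -- grouped.get(profile) or []
    if items.isEmpty then lines
    else
      let ok_count : Int := items.foldl (fun n item => if pvOkHost overall_map item then n + 1 else n) 0
      let total : Int := (items.length : Int)
      lines ++ ["- " ++ PySem.Dict.getD PROFILE_LABELS profile profile ++ ": " ++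
                PySem.Int.toStr ok_count ++ "/" ++ PySem.Int.toStr total ++ " 正常"]) []

-- ===== PORT B =====
def summarize_groups_alt (hosts : List (List (String × String))) (overall_map : List (String × Option Bool)) : List String :=
  ([("core", "核心"), ("standard", "标准"), ("retired", "观察"), ("exception", "例外")] : List (String × String)).foldl
    (fun lines pl =>
      let st : Int × Int := hosts.foldl (fun s h =>
          if pvProf h == pl.1 then
            (s.1 + (if pvOkHost overall_map h then 1 else 0), s.2 + 1)
          else s) (0, 0)
      if st.2 ≠ 0 then
        lines ++ ["- " ++ pl.2 ++ ": " ++ PySem.Int.toStr st.1 ++ "/" ++ PySem.Int.toStr st.2 ++ " 正常"]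
      else lines) []

-- ===== PRECONDITION & SPEC =====
-- A (and B) raise KeyError exactly when some host whose alert_profile is one of the four
-- labelled profiles has no 'name' key; Pre_ excludes exactly those inputs.
def Pre_summarize_groups (hosts : List (List (String × String))) (overall_map : List (String × Option Bool)) : Prop :=
  ∀ h ∈ hosts,
    PySem.Dict.getD (PySem.Dict.mk h) "alert_profile" "standard" ∈ (["core", "standard", "retired", "exception"] : List String) →
    (PySem.Dict.get? (PySem.Dict.mk h) "name").isSome = true
instance (hosts : List (List (String × String))) (overall_map : List (String × Option Bool)) : Decidable (Pre_summarize_groups hosts overall_map) := by unfold Pre_summarize_groups; infer_instance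

def pvWitness_summarize_groups : (List (List (String × String))) × (List (String × Option Bool)) :=
  ([[("name", "a")], [("name", "b"), ("alert_profile", "core")]], [("a", some true), ("b", some false)])

def Spec_summarize_groups (hosts : List (List (String × String))) (overall_map : List (String × Option Bool)) (out : List String) : Prop := out = summarize_groups_alt hosts overall_map
instance (hosts : List (List (String × String))) (overall_map : List (String × Option Bool)) (out : List String) : Decidable (Spec_summarize_groups hosts overall_map out) := by unfold Spec_summarize_groups; infer_instance

-- ===== CLAIM (what is proved, stated in full; the proofs are below) =====
def Claim_equal_summarize_groups : Prop := ∀ (hosts : List (List (String × String))) (overall_map : List (String × Option Bool)), Dom_summarize_groups hosts overall_map → Pre_summarize_groups hosts overall_map → Spec_summarize_groups hosts overall_map (summarize_groups hosts overall_map)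

-- ===== LEMMAS AND PROOFS =====

-- A's grouping loop: the bucket of profile p holds exactly the hosts whose profile is p, in order.
theorem pv_grouped_getD (hs : List (List (String × String)))
    (g : PySem.Dict String (List (List (String × String)))) (p : String) :
    ((hs.foldl (fun g h => g.insert (pvProf h) (g.getD (pvProf h) [] ++ [h])) g).get? p).getD []
      = (g.get? p).getD [] ++ hs.filter (fun h => pvProf h == p) := by
  induction hs generalizing g with
  | nil => simp
  | cons h t ih =>
    simp only [List.foldl_cons, List.filter_cons]
    rw [ih]
    by_cases hp : p = pvProf h
    · subst hp
      rw [PySem.Dict.get?_insert_self]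
      simp [PySem.Dict.getD]
    · rw [PySem.Dict.get?_insert_of_ne _ _ hp]
      have : (pvProf h == p) = false := by simp [Ne.symm hp]
      simp [this]

-- B's fused counting loop computes (ok over the bucket, size of the bucket).
theorem pv_alt_count (om : List (String × Option Bool)) (p : String)
    (hs : List (List (String × String))) (a b : Int) :
    hs.foldl (fun (s : Int × Int) h =>
        if pvProf h == p then (s.1 + (if pvOkHost om h then 1 else 0), s.2 + 1) else s) (a, b)
      = (a + ((hs.filter (fun h => pvProf h == p)).countP (pvOkHost om) : Int),
         b + (((hs.filter (fun h => pvProf h == p)).length : Int))) := by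
  induction hs generalizing a b with
  | nil => simp
  | cons h t ih =>
    simp only [List.foldl_cons, List.filter_cons]
    cases hp : (pvProf h == p) with
    | true =>
      simp only [if_true]
      rw [ih]
      cases hok : pvOkHost om h <;>
        simp [hok, Prod.ext_iff] <;>
        first
          | exact ⟨trivial, trivial⟩
          | omega
    | false =>
      simp only [Bool.false_eq_true, if_false]
      exact ih a b

-- ===== VERDICT (by name: the statement is the Claim_ definition above) =====
theorem summarize_groups_spec : Claim_equal_summarize_groups := by
  intro hosts om _hdom _hpre
  unfold Spec_summarize_groups summarize_groups summarize_groups_alt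
  simp only [List.foldl_cons, List.foldl_nil, pv_alt_count, pv_grouped_getD,
    PySem.Dict.get?_empty, Option.getD_none, List.nil_append,
    PySem.List.foldl_count_if, zero_add]
  have l1 : (PySem.Dict.ofList [("core", "核心"), ("standard", "标准"), ("retired", "观察"), ("exception", "例外")]).get? "core" = some "核心" := by decide
  have l2 : (PySem.Dict.ofList [("core", "核心"), ("standard", "标准"), ("retired", "观察"), ("exception", "例外")]).get? "standard" = some "标准" := by decide
  have l3 : (PySem.Dict.ofList [("core", "核心"), ("standard", "标准"), ("retired", "观察"), ("exception", "例外")]).get? "retired" = some "观察" := by decide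
  have l4 : (PySem.Dict.ofList [("core", "核心"), ("standard", "标准"), ("retired", "观察"), ("exception", "例外")]).get? "exception" = some "例外" := by decide
  by_cases h1 : hosts.filter (fun h => pvProf h == "core") = [] <;>
  by_cases h2 : hosts.filter (fun h => pvProf h == "standard") = [] <;>
  by_cases h3 : hosts.filter (fun h => pvProf h == "retired") = [] <;>
  by_cases h4 : hosts.filter (fun h => pvProf h == "exception") = [] <;>
    simp [h1, h2, h3, h4, List.isEmpty_iff, List.length_eq_zero_iff,
      PROFILE_LABELS, PySem.Dict.getD, l1, l2, l3, l4]
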